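-- pv_equiv track=rewrite | github.com/spcl/llamp | mpi-dep-graph/macro_ir.py | _chunk_bytes
-- ===== SOURCE A (Python) =====
-- from typing import Dict, Iterable, List, Optional, Tuple
--
-- def _chunk_bytes(total_work_bytes: int, chunk_bytes: int) -> List[int]:
--     remaining = total_work_bytes
--     chunks: List[int] = []
--     while remaining > 0:
--         curr = min(chunk_bytes, remaining)
--         chunks.append(curr)
--         remaining -= curr
--     return chunks
-- ===== SOURCE B (Python) =====
-- from typing import List
--
-- def _chunk_bytes(total_work_bytes: int, chunk_bytes: int) -> List[int]:
--     if total_work_bytes <= 0: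
--         return []
--     q, r = divmod(total_work_bytes, chunk_bytes)
--     return [chunk_bytes] * q + ([r] if r else [])
-- ===== Notes on version B (the rewrite author's own statement) =====
-- stated objective: simpler
-- what changed: Replaced the subtract-and-append loop by a closed-form divmod: q full chunks plus the remainder when nonzero.
import Mathlib
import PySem

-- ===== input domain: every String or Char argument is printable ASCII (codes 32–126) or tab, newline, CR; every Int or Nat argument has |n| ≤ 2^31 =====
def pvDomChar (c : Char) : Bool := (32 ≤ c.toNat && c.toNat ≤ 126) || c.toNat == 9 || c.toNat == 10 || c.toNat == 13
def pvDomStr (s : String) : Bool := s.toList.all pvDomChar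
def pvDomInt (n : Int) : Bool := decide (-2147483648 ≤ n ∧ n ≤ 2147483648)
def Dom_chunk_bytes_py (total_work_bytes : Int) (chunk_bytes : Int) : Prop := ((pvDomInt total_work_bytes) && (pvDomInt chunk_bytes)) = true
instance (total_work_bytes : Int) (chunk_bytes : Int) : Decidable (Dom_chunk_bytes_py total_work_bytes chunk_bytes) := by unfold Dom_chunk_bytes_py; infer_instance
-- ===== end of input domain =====

-- B replaces A's subtract-and-append loop by closed-form divmod arithmetic (objective: simpler).


-- ===== PORT A =====
-- A's while-loop: append min(chunk_bytes, remaining) and subtract, while remaining > 0.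
-- The inner `0 < chunk_bytes` test is only a totality guard: when chunk_bytes ≤ 0 and
-- remaining > 0 the Python loop never terminates (outside Pre_), and we return [] there.
def chunkLoopA (chunk_bytes : Int) (remaining : Int) : List Int :=
  if _h : 0 < remaining then
    if _hc : 0 < chunk_bytes then
      let curr := min chunk_bytes remaining
      curr :: chunkLoopA chunk_bytes (remaining - curr)
    else []
  else []
termination_by remaining.toNat
decreasing_by
  have : 0 < min chunk_bytes remaining := by omega
  omega

def chunk_bytes_py (total_work_bytes : Int) (chunk_bytes : Int) : List Int :=
  chunkLoopA chunk_bytes total_work_bytes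

-- ===== PORT B =====
-- B: early [] for non-positive totals, else q full chunks and the remainder if nonzero.
def chunk_bytes_py_alt (total_work_bytes : Int) (chunk_bytes : Int) : List Int :=
  if total_work_bytes ≤ 0 then []
  else
    let q := PySem.Int.floordiv total_work_bytes chunk_bytes
    let r := PySem.Int.mod total_work_bytes chunk_bytes
    List.replicate q.toNat chunk_bytes ++ (if r ≠ 0 then [r] else [])

-- ===== PRECONDITION & SPEC =====
-- Pre_ excludes only inputs where A does not return: for chunk_bytes ≤ 0 and a positive
-- total, A's loop never terminates (remaining never decreases).
def Pre_chunk_bytes_py (total_work_bytes : Int) (chunk_bytes : Int) : Prop :=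
  total_work_bytes ≤ 0 ∨ 0 < chunk_bytes
instance (total_work_bytes : Int) (chunk_bytes : Int) : Decidable (Pre_chunk_bytes_py total_work_bytes chunk_bytes) := by unfold Pre_chunk_bytes_py; infer_instance

def pvWitness_chunk_bytes_py : Int × Int := (10, 3)

def Spec_chunk_bytes_py (total_work_bytes : Int) (chunk_bytes : Int) (out : List Int) : Prop := out = chunk_bytes_py_alt total_work_bytes chunk_bytes
instance (total_work_bytes : Int) (chunk_bytes : Int) (out : List Int) : Decidable (Spec_chunk_bytes_py total_work_bytes chunk_bytes out) := by unfold Spec_chunk_bytes_py; infer_instance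

-- ===== CLAIM (what is proved, stated in full; the proofs are below) =====
def Claim_equal_chunk_bytes_py : Prop := ∀ (total_work_bytes : Int) (chunk_bytes : Int), Dom_chunk_bytes_py total_work_bytes chunk_bytes → Pre_chunk_bytes_py total_work_bytes chunk_bytes → Spec_chunk_bytes_py total_work_bytes chunk_bytes (chunk_bytes_py total_work_bytes chunk_bytes)

-- ===== LEMMAS AND PROOFS =====

-- Closed form of A's loop in terms of Euclidean div/mod (c > 0), by strong induction on t.toNat.
theorem chunkLoopA_closed (c : Int) (hc : 0 < c) : ∀ (n : Nat) (t : Int), t.toNat = n →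
    chunkLoopA c t =
      if t ≤ 0 then []
      else List.replicate (t / c).toNat c ++ (if t % c ≠ 0 then [t % c] else []) := by
  intro n
  induction n using Nat.strong_induction_on with
  | _ n ih =>
    intro t htn
    by_cases ht : t ≤ 0
    · rw [chunkLoopA]; simp [ht]
    · rw [not_le] at ht
      rw [chunkLoopA]
      simp only [dif_pos ht, dif_pos hc, if_neg (by omega : ¬ t ≤ 0)]
      by_cases hlt : t < c
      · -- last, partial chunk: min c t = t, remaining becomes 0
        have hmin : min c t = t := by omega
        have h0 : chunkLoopA c 0 = [] := by rw [chunkLoopA]; simp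
        have hdiv : t / c = 0 := Int.ediv_eq_zero_of_lt (by omega) hlt
        have hmod : t % c = t := Int.emod_eq_of_lt (by omega) hlt
        simp [hmin, h0, hdiv, hmod]
        omega
      · -- full chunk: min c t = c, recurse on t - c
        rw [not_lt] at hlt
        have hmin : min c t = c := by omega
        have hrec := ih (t - c).toNat (by omega) (t - c) rfl
        rw [hmin, hrec]
        have hdiv : (t - c) / c = t / c - 1 := by
          have heq : t + -1 * c = t - c := by ring
          have h2 := Int.add_mul_ediv_right t (-1) (by omega : c ≠ 0)
          rw [heq] at h2
          omega
        have hmod : (t - c) % c = t % c := by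
          exact Int.sub_emod_right t c
        by_cases htc : t - c ≤ 0
        · -- t = c exactly: one chunk, no remainder
          have htc' : t = c := by omega
          simp [htc', Int.ediv_self (by omega : c ≠ 0)]
        · have hq : 0 < t / c := by
            have := Int.ediv_nonneg (a := t - c) (b := c) (by omega) (by omega)
            omega
          have hqn : (t / c).toNat = ((t - c) / c).toNat + 1 := by omega
          simp only [if_neg htc, hdiv, hmod, hqn, List.replicate_succ, List.cons_append]

theorem chunk_bytes_py_spec : Claim_equal_chunk_bytes_py := by
  intro t c _ hpre
  unfold Spec_chunk_bytes_py chunk_bytes_py chunk_bytes_py_alt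
  rcases hpre with h | hc
  · rw [chunkLoopA]
    simp [h]
  · rw [chunkLoopA_closed c hc t.toNat t rfl,
      PySem.Int.floordiv_eq_ediv_of_pos hc, PySem.Int.mod_eq_emod_of_pos hc]
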